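-- pv_equiv track=rewrite | github.com/Wemmy/aimbot_volarant_yolov8 | logic/arduino.py | split_value
-- ===== SOURCE A (Python) =====
-- def split_value(value):
--     MAX_VALUE = 127
--     values = []
--
--     sign = -1 if value < 0 else 1
--
--     while abs(value) > MAX_VALUE:
--         values.append(sign * MAX_VALUE)
--         value -= sign * MAX_VALUE
--
--     values.append(value)
--
--     return values
-- ===== SOURCE B (Python) =====
-- def split_value(value):
--     if value == 0:
--         return [0]
--     sign = -1 if value < 0 else 1
--     q = (abs(value) - 1) // 127
--     return [sign * 127] * q + [value - sign * 127 * q]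
-- ===== Notes on version B (the rewrite author's own statement) =====
-- stated objective: simpler
-- what changed: Replaces the repeated-subtraction while loop with a closed form: the number of full chunks is computed arithmetically as (abs(value)-1)//MAX_VALUE and the result list is built in one shot via list replication plus the remainder.
import Mathlib
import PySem

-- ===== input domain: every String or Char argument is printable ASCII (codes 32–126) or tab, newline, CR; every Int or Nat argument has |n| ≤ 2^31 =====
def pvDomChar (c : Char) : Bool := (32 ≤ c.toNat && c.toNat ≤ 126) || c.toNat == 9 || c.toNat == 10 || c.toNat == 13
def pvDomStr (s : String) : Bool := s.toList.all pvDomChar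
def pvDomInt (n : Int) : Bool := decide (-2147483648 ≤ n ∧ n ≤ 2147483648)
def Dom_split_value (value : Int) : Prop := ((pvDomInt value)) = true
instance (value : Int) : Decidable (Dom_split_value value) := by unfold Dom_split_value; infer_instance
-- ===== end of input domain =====

-- B replaces A's repeated-subtraction loop with a closed-form chunk count and a one-shot list build (objective: simpler).

-- ===== PORT A =====
-- A's while loop, fuel = value.natAbs (each iteration removes 127 from |value|, so natAbs iterations always suffice; fuel never runs out on any input)
def splitLoop : Nat → Int → Int → List Int → List Int
  | 0, value, _sign, values => values ++ [value]
  | fuel+1, value, sign, values =>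
      if 127 < |value| then splitLoop fuel (value - sign * 127) sign (values ++ [sign * 127])
      else values ++ [value]

def split_value (value : Int) : List Int :=
  splitLoop value.natAbs value (if value < 0 then -1 else 1) []

-- ===== PORT B =====
def split_value_alt (value : Int) : List Int :=
  if value = 0 then [0]
  else
    let sign : Int := if value < 0 then -1 else 1
    let q : Int := PySem.Int.floordiv (|value| - 1) 127
    List.replicate q.toNat (sign * 127) ++ [value - sign * 127 * q]

-- ===== PRECONDITION & SPEC =====
def Spec_split_value (value : Int) (out : List Int) : Prop := out = split_value_alt value
instance (value : Int) (out : List Int) : Decidable (Spec_split_value value out) := by unfold Spec_split_value; infer_instance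

-- ===== CLAIM (what is proved, stated in full; the proofs are below) =====
def Claim_equal_split_value : Prop := ∀ (value : Int), Dom_split_value value → Spec_split_value value (split_value value)

-- ===== LEMMAS AND PROOFS =====

lemma alt_small (value : Int) (h : |value| ≤ 127) : split_value_alt value = [value] := by
  unfold split_value_alt
  by_cases h0 : value = 0
  · simp [h0]
  · have hb : (0:Int) < 127 := by norm_num
    simp only [h0, if_false]
    rw [PySem.Int.floordiv_eq_ediv_of_pos hb]
    have habs : |value| = (value.natAbs : Int) := by rw [Int.abs_eq_natAbs]
    have hq : ((value.natAbs : Int) - 1) / 127 = 0 := by omega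
    rw [habs, hq]
    simp

lemma alt_step (value sign : Int) (hs : sign = if value < 0 then (-1:Int) else 1)
    (h : 127 < |value|) :
    split_value_alt value = sign * 127 :: split_value_alt (value - sign * 127) := by
  have hb : (0:Int) < 127 := by norm_num
  rcases lt_abs.mp h with hv | hv
  · -- 127 < value, sign = 1
    have hs1 : sign = 1 := by rw [hs]; simp; omega
    subst hs1
    unfold split_value_alt
    have h0 : value ≠ 0 := by omega
    have h0' : value - 1 * 127 ≠ 0 := by omega
    have hlt : ¬ value < 0 := by omega
    have hlt' : ¬ value - 1 * 127 < 0 := by omega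
    simp only [h0, h0', if_false, hlt, hlt']
    rw [PySem.Int.floordiv_eq_ediv_of_pos hb, PySem.Int.floordiv_eq_ediv_of_pos hb]
    have ha : |value| = value := abs_of_pos (by omega)
    have ha' : |value - 1 * 127| = value - 127 := abs_of_pos (by omega)
    rw [ha, ha']
    have hq : (value - 127 - 1) / 127 = (value - 1) / 127 - 1 := by omega
    have hn : ((value - 1) / 127).toNat = ((value - 127 - 1) / 127).toNat + 1 := by omega
    rw [hn, List.replicate_succ]
    simp only [List.cons_append, List.cons.injEq, true_and]
    congr 1
    simp only [List.cons.injEq, and_true]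
    omega
  · -- value < -127, sign = -1
    have hs1 : sign = -1 := by rw [hs]; simp; omega
    subst hs1
    unfold split_value_alt
    have h0 : value ≠ 0 := by omega
    have h0' : value - (-1) * 127 ≠ 0 := by omega
    have hlt : value < 0 := by omega
    have hlt' : value - (-1) * 127 < 0 := by omega
    simp only [h0, h0', if_false, hlt, if_true]
    rw [PySem.Int.floordiv_eq_ediv_of_pos hb, PySem.Int.floordiv_eq_ediv_of_pos hb]
    have ha : |value| = -value := abs_of_neg (by omega)
    have ha' : |value - (-1) * 127| = -(value + 127) := by rw [abs_of_neg (by omega)]; ring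
    rw [ha, ha']
    have hq : (-(value + 127) - 1) / 127 = (-value - 1) / 127 - 1 := by omega
    have hn : ((-value - 1) / 127).toNat = ((-(value + 127) - 1) / 127).toNat + 1 := by omega
    rw [hn, List.replicate_succ]
    simp only [List.cons_append, List.cons.injEq, true_and]
    congr 1
    · congr 1
      split_ifs <;> omega
    · simp only [List.cons.injEq, and_true]
      split_ifs <;> omega

lemma loop_eq : ∀ (fuel : Nat) (value sign : Int) (acc : List Int),
    sign = (if value < 0 then (-1:Int) else 1) → value.natAbs ≤ 127 * fuel + 127 →
    splitLoop fuel value sign acc = acc ++ split_value_alt value := by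
  intro fuel
  induction fuel with
  | zero =>
    intro value sign acc hs h
    rw [splitLoop, alt_small value (by rw [Int.abs_eq_natAbs]; omega)]
  | succ n ih =>
    intro value sign acc hs h
    rw [splitLoop]
    split_ifs with hgt
    · have habs : 127 < (value.natAbs : Int) := by rwa [Int.abs_eq_natAbs] at hgt
      have hv' : 127 < value ∨ value < -127 := by omega
      have hs' : sign = (if value - sign * 127 < 0 then (-1:Int) else 1) := by
        rcases hv' with hv | hv
        · have h1 : sign = 1 := by rw [hs]; simp [show ¬ value < 0 by omega]
          subst h1; split_ifs <;> omega
        · have h1 : sign = -1 := by rw [hs]; simp [show value < 0 by omega]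
          subst h1; split_ifs <;> omega
      have hna : (value - sign * 127).natAbs ≤ 127 * n + 127 := by
        rcases hv' with hv | hv
        · have h1 : sign = 1 := by rw [hs]; simp [show ¬ value < 0 by omega]
          subst h1; omega
        · have h1 : sign = -1 := by rw [hs]; simp [show value < 0 by omega]
          subst h1; omega
      rw [ih (value - sign * 127) sign _ hs' hna, alt_step value sign hs hgt]
      simp
    · rw [alt_small value (by omega)]

-- ===== VERDICT (by name: the statement is the Claim_ definition above) =====
theorem split_value_spec : Claim_equal_split_value := by
  intro value _
  unfold Spec_split_value split_value
  rw [loop_eq value.natAbs value _ [] rfl (by omega)]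
  simp
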